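-- pv_equiv track=rewrite | github.com/HaloKim/self_study | 1d1c/프로그래머스/최고의집합.py | solution
-- ===== SOURCE A (Python) =====
-- def solution(n, s):
--     if n <= s:
--         p,r = divmod(s,n)
--         arr = [p for _ in range(n)]
--         for i in range(r):
--             arr[i] += 1
--         arr.sort()
--         return arr
--     else:
--         return [-1]
-- ===== SOURCE B (Python) =====
-- def solution(n, s):
--     if n > s:
--         return [-1]
--     out = []
--     while n > 0:
--         q = s // n          # smallest value among the n remaining slots
--         out.append(q)
--         s -= q
--         n -= 1
--     return out
-- ===== Notes on version B (the rewrite author's own statement) =====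
-- stated objective: alternative
-- what changed: B replaces A's divmod + uniform array + in-place increment loop + sort by a greedy single loop that repeatedly appends the smallest remaining value s//n and peels it off the sum, producing the ascending list directly with no remainder bookkeeping and no sort.
import Mathlib
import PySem

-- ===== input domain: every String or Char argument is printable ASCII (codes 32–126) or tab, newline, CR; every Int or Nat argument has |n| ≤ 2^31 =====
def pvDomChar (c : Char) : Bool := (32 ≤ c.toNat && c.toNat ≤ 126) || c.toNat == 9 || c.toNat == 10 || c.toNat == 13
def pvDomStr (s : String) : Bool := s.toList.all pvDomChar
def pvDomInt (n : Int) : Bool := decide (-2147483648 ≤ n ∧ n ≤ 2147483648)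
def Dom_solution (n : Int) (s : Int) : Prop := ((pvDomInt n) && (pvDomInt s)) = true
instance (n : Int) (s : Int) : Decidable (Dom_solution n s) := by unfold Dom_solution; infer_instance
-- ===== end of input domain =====

-- B replaces A's divmod + uniform array + increment loop + sort by a greedy one-pass loop that
-- repeatedly peels off the smallest remaining value s // n (alternative decomposition, no sort).

-- ===== PORT A =====
def solution (n : Int) (s : Int) : List Int :=
  if n ≤ s then
    match PySem.Int.divmod? s n with
    | some (p, r) =>
      let arr := (PySem.List.pyRange 0 n 1).map (fun _ => p)
      let arr := (PySem.List.pyRange 0 r 1).foldl (fun a i => a.modify i.toNat (fun x => x + 1)) arr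
      PySem.List.sorted arr (fun x => x) false
    | none => []   -- unreachable inside Pre_ (n = 0 raises in Python)
  else
    [-1]

-- ===== PORT B =====
-- the while loop of Source B: runs while n > 0, so it recurses on n.toNat
def solLoop : Nat → Int → List Int → List Int
  | 0, _, acc => acc
  | Nat.succ k, s, acc =>
      let q := PySem.Int.floordiv s ((k + 1 : Nat) : Int)
      solLoop k (s - q) (acc ++ [q])

def solution_alt (n : Int) (s : Int) : List Int :=
  if n > s then [-1] else solLoop n.toNat s []

-- ===== PRECONDITION & SPEC =====
-- Pre_ excludes exactly n = 0 with n ≤ s, where Python's divmod(s, 0) in A raises ZeroDivisionError.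
def Pre_solution (n : Int) (s : Int) : Prop := ¬ (n = 0 ∧ n ≤ s)
instance (n : Int) (s : Int) : Decidable (Pre_solution n s) := by unfold Pre_solution; infer_instance
def pvWitness_solution : Int × Int := (3, 7)

def Spec_solution (n : Int) (s : Int) (out : List Int) : Prop := out = solution_alt n s
instance (n : Int) (s : Int) (out : List Int) : Decidable (Spec_solution n s out) := by unfold Spec_solution; infer_instance

-- ===== CLAIM (what is proved, stated in full; the proofs are below) =====
def Claim_equal_solution : Prop := ∀ (n : Int) (s : Int), Dom_solution n s → Pre_solution n s → Spec_solution n s (solution n s)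

-- ===== LEMMAS AND PROOFS =====

-- floor-division/mod characterisation for a positive divisor
theorem fd_mod_char (d p r s : Int) (hd : 0 < d) (hs : s = d * p + r)
    (hr0 : 0 ≤ r) (hrd : r < d) :
    PySem.Int.floordiv s d = p ∧ PySem.Int.mod s d = r := by
  have hfd : PySem.Int.floordiv s d = p := by
    rw [PySem.Int.floordiv_eq_iff_of_pos hd]
    constructor <;> nlinarith
  refine ⟨hfd, ?_⟩
  have := PySem.Int.floordiv_mul_add_mod s d
  rw [hfd] at this
  linarith [this]

-- the greedy loop produces the sorted split: (k+1-r) copies of p followed by r copies of p+1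
theorem solLoop_eq (k : Nat) : ∀ (s : Int) (acc : List Int),
    solLoop (k + 1) s acc
    = acc ++ List.replicate ((k + 1) - (PySem.Int.mod s ((k + 1 : Nat) : Int)).toNat)
              (PySem.Int.floordiv s ((k + 1 : Nat) : Int))
          ++ List.replicate (PySem.Int.mod s ((k + 1 : Nat) : Int)).toNat
              (PySem.Int.floordiv s ((k + 1 : Nat) : Int) + 1) := by
  induction k with
  | zero =>
    intro s acc
    have h1 : PySem.Int.floordiv s ((1 : Nat) : Int) = s ∧ PySem.Int.mod s ((1 : Nat) : Int) = 0 :=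
      fd_mod_char 1 s 0 s (by omega) (by ring) (by omega) (by omega)
    simp [solLoop]
  | succ k ih =>
    intro s acc
    set d : Int := ((k + 2 : Nat) : Int) with hd
    have hdpos : (0 : Int) < d := by simp [hd]; omega
    set p : Int := PySem.Int.floordiv s d with hp
    set r : Int := PySem.Int.mod s d with hr
    have hr0 : 0 ≤ r := hr ▸ PySem.Int.mod_nonneg s hdpos
    have hrd : r < d := hr ▸ PySem.Int.mod_lt s hdpos
    have hsum : p * d + r = s := by rw [hp, hr]; exact PySem.Int.floordiv_mul_add_mod s d
    -- unfold one step of the loop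
    show solLoop (k + 1) (s - p) (acc ++ [p]) = _
    rw [ih (s - p) (acc ++ [p])]
    have hsplit : s - p = ((k + 1 : Nat) : Int) * p + r := by push_cast [hd] at hsum ⊢; linarith
    by_cases hcase : r < ((k + 1 : Nat) : Int)
    · have hc := fd_mod_char ((k + 1 : Nat) : Int) p r (s - p) (by push_cast; omega) hsplit hr0 hcase
      rw [hc.1, hc.2]
      have hle : r.toNat ≤ k + 1 := by omega
      have h2 : (k + 2) - r.toNat = ((k + 1) - r.toNat) + 1 := by omega
      rw [h2, List.replicate_succ, List.append_assoc]
      simp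
    · have hreq : r = ((k + 1 : Nat) : Int) := by push_cast at hcase hrd ⊢; omega
      have hsplit2 : s - p = ((k + 1 : Nat) : Int) * (p + 1) + 0 := by
        rw [hsplit, hreq]; ring
      have hc := fd_mod_char ((k + 1 : Nat) : Int) (p + 1) 0 (s - p) (by push_cast; omega)
        hsplit2 (by omega) (by push_cast; omega)
      rw [hc.1, hc.2]
      have h3 : (k + 2) - r.toNat = 1 := by omega
      have h4 : r.toNat = k + 1 := by omega
      simp [h4, List.replicate_succ]

-- A's sort-based computation yields the same split (proof about port A)
theorem loop_replicate (p : Int) (len : Nat) : ∀ (r : Nat), r ≤ len →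
    (PySem.List.pyRange 0 (r : Int) 1).foldl (fun a i => a.modify i.toNat (fun x => x + 1))
      (List.replicate len p)
    = List.replicate r (p + 1) ++ List.replicate (len - r) p := by
  intro r
  induction r with
  | zero => intro _; simp [PySem.List.pyRange_one_eq_nil]
  | succ k ih =>
    intro hle
    have h1 : ((k : Int) + 1) = ((k + 1 : Nat) : Int) := by push_cast; ring
    have hsplit := PySem.List.pyRange_one_succ_right (a := 0) (b := (k : Int)) (by positivity)
    rw [← h1] at *
    rw [hsplit, List.foldl_append, ih (by omega)]
    simp only [List.foldl_cons, List.foldl_nil]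
    have htn : ((k : Int)).toNat = k := by omega
    rw [htn]
    have hlt : k < (List.replicate k (p + 1) ++ List.replicate (len - k) p).length := by
      simp; omega
    rw [List.modify_eq_take_cons_drop hlt]
    have hget : (List.replicate k (p + 1) ++ List.replicate (len - k) p)[k] = p := by
      rw [List.getElem_append_right (by simp)]
      simp
    have htake : (List.replicate k (p + 1) ++ List.replicate (len - k) p).take k
        = List.replicate k (p + 1) := by
      rw [List.take_append_of_le_length (by simp)]
      simp
    have hdrop : (List.replicate k (p + 1) ++ List.replicate (len - k) p).drop (k + 1)
        = List.replicate (len - (k + 1)) p := by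
      have : k + 1 = (List.replicate k (p + 1)).length + 1 := by simp
      rw [this, List.drop_append]
      simp [List.drop_replicate]
      omega
    rw [hget, htake, hdrop, List.replicate_succ' (n := k) (a := p + 1)]
    simp

theorem main_pos (n s : Int) (hn : 0 < n) (_ : n ≤ s) (p r : Int)
    (_ : p = PySem.Int.floordiv s n) (hr : r = PySem.Int.mod s n) :
    PySem.List.sorted
      ((PySem.List.pyRange 0 r 1).foldl (fun a i => a.modify i.toNat (fun x => x + 1))
        ((PySem.List.pyRange 0 n 1).map (fun _ => p))) (fun x => x) false
    = List.replicate (n - r).toNat p ++ List.replicate r.toNat (p + 1) := by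
  have hr0 : 0 ≤ r := hr ▸ PySem.Int.mod_nonneg s hn
  have hrn : r < n := hr ▸ PySem.Int.mod_lt s hn
  have hmap : (PySem.List.pyRange 0 n 1).map (fun _ => p) = List.replicate n.toNat p := by
    have h1 : ∀ b ∈ (PySem.List.pyRange 0 n 1).map (fun _ => p), b = p := by simp
    rw [List.eq_replicate_of_mem h1]
    simp [PySem.List.length_pyRange_one]
  rw [hmap]
  have hcast : r = ((r.toNat : Nat) : Int) := by omega
  rw [hcast, loop_replicate p n.toNat r.toNat (by omega)]
  apply PySem.List.sorted_id_eq_of_perm_of_pairwise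
  · have h2 : (n - ((r.toNat : Nat) : Int)).toNat = n.toNat - r.toNat := by omega
    have h3 : (((r.toNat : Nat) : Int)).toNat = r.toNat := by omega
    rw [h2, h3]
    exact List.perm_append_comm
  · refine List.pairwise_append.mpr ⟨?_, ?_, ?_⟩
    · exact List.pairwise_replicate.mpr (Or.inr (le_refl p))
    · exact List.pairwise_replicate.mpr (Or.inr (le_refl (p + 1)))
    · intro a ha b hb
      rw [List.eq_of_mem_replicate ha, List.eq_of_mem_replicate hb]
      omega

-- ===== VERDICT (by name: the statement is the Claim_ definition above) =====
theorem solution_spec : Claim_equal_solution := by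
  intro n s _ hpre
  unfold Spec_solution solution solution_alt
  by_cases hns : n ≤ s
  · simp only [if_pos hns, if_neg (not_lt.mpr hns)]
    have hn0 : n ≠ 0 := fun h => hpre ⟨h, hns⟩
    have hdm : PySem.Int.divmod? s n = some (PySem.Int.floordiv s n, PySem.Int.mod s n) := by
      simp [PySem.Int.divmod?, PySem.Int.floordiv, PySem.Int.mod, hn0]
    simp only [hdm]
    rcases lt_or_gt_of_ne hn0 with hneg | hpos
    · -- n < 0: both sides are []
      have hrb := PySem.Int.mod_neg_bounds s hneg
      have h1 : PySem.List.pyRange 0 n 1 = [] := PySem.List.pyRange_one_eq_nil (by omega)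
      have h2 : PySem.List.pyRange 0 (PySem.Int.mod s n) 1 = [] :=
        PySem.List.pyRange_one_eq_nil (by omega)
      have h3 : n.toNat = 0 := by omega
      simp [h1, h2, h3, PySem.List.sorted, solLoop]
    · rw [main_pos n s hpos hns _ _ rfl rfl]
      obtain ⟨k, hk⟩ : ∃ k : Nat, n.toNat = k + 1 := ⟨n.toNat - 1, by omega⟩
      have hcast : ((k + 1 : Nat) : Int) = n := by omega
      rw [hk, solLoop_eq k s [], hcast]
      have h4 : (k + 1) - (PySem.Int.mod s n).toNat = (n - PySem.Int.mod s n).toNat := by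
        have := PySem.Int.mod_nonneg s hpos
        have := PySem.Int.mod_lt s hpos
        omega
      rw [h4]
      simp
  · simp [if_neg hns, if_pos (not_le.mp hns)]
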